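-- pv_equiv track=rewrite | github.com/Anilkumargundu/Qubit_visualization | LCG_attack.py | estimate_modulus_from_sequence
-- ===== SOURCE A (Python) =====
-- from math import gcd
--
-- def estimate_modulus_from_sequence(X):
--     """Estimate modulus M from sequence X using the gcd trick on differences."""
--     if len(X) < 4:
--         return None
--     diffs = [int(X[i+1] - X[i]) for i in range(len(X)-1)]
--     Ys = []
--     for i in range(len(diffs)-2):
--         val = diffs[i+2]*diffs[i] - (diffs[i+1]**2)
--         if val != 0:
--             Ys.append(abs(val))
--     if not Ys:
--         return None
--     M_est = Ys[0]
--     for v in Ys[1:]: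
--         M_est = gcd(M_est, v)
--     return abs(M_est) if M_est != 0 else None
-- ===== SOURCE B (Python) =====
-- from math import gcd
--
--
-- def estimate_modulus_from_sequence(X):
--     """Estimate modulus M from sequence X using the gcd trick on differences.
--
--     Divide-and-conquer: the gcd of the window determinants
--     det(i) = (X[i+3]-X[i+2])*(X[i+1]-X[i]) - (X[i+2]-X[i+1])**2
--     is computed by recursively splitting the index range [0, n-3) in half
--     and gcd-combining the two halves (gcd is associative/commutative, and
--     gcd(0, v) = |v| absorbs zero determinants), instead of A's staged lists
--     (diffs, filtered Ys) and linear seeded fold.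
--     """
--     n = len(X)
--     if n < 4:
--         return None
--
--     def det(i):
--         return (X[i + 3] - X[i + 2]) * (X[i + 1] - X[i]) - (X[i + 2] - X[i + 1]) ** 2
--
--     def g(lo, hi):  # gcd (up to sign) of det(i) for lo <= i < hi; hi - lo >= 1
--         if hi - lo <= 1:
--             return det(lo)
--         mid = (lo + hi) // 2
--         return gcd(g(lo, mid), g(mid, hi))
--
--     M = abs(g(0, n - 3))
--     return M or None
-- ===== Notes on version B (the rewrite author's own statement) =====
-- stated objective: alternative
-- what changed: Replaced A's staged passes (build diffs list, build filtered abs list Ys, then a seeded linear gcd fold) by a divide-and-conquer recursion that splits the window-index range in half and gcd-combines the halves, computing each window determinant directly from X with no intermediate lists; correct because gcd is associative/commutative and gcd(0,v)=|v| absorbs zero determinants.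
import Mathlib
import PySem

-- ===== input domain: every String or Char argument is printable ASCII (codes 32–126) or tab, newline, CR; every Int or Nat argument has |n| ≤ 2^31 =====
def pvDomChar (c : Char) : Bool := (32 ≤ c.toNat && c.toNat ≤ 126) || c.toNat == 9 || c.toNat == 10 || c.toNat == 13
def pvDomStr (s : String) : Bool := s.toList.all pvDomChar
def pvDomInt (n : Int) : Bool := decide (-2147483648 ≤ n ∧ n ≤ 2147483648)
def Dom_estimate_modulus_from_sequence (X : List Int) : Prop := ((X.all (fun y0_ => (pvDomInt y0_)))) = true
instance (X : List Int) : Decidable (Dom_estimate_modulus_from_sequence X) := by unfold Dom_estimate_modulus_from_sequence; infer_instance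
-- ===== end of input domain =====

-- B replaces A's staged passes (diffs list, filtered Ys list, seeded linear gcd fold) by a
-- divide-and-conquer gcd over window determinants computed directly from X; objective: alternative.

-- ===== PORT A =====
-- math.gcd(a, b) in Python = nonnegative gcd of |a|, |b| = (Int.gcd a b : Int)
def pyGcd (a b : Int) : Int := (Int.gcd a b : Int)

def estimate_modulus_from_sequence (X : List Int) : Option Int :=
  if X.length < 4 then none
  else
    let diffs : List Int :=
      (PySem.List.pyRange 0 ((X.length : Int) - 1) 1).map
        (fun i => PySem.List.pyGetD X (i + 1) 0 - PySem.List.pyGetD X i 0)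
    let Ys : List Int :=
      (PySem.List.pyRange 0 ((diffs.length : Int) - 2) 1).foldl
        (fun Ys i =>
          let val := PySem.List.pyGetD diffs (i + 2) 0 * PySem.List.pyGetD diffs i 0 -
                     (PySem.List.pyGetD diffs (i + 1) 0) ^ 2
          if val ≠ 0 then Ys ++ [|val|] else Ys) []
    match Ys with
    | [] => none
    | y :: ys =>
      let M_est := ys.foldl (fun m v => pyGcd m v) y
      if M_est ≠ 0 then some |M_est| else none

-- ===== PORT B =====
-- det(i) = (X[i+3]-X[i+2])*(X[i+1]-X[i]) - (X[i+2]-X[i+1])**2 (indices always in range when called)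
def pvDet (X : List Int) (i : Nat) : Int :=
  (X.getD (i + 3) 0 - X.getD (i + 2) 0) * (X.getD (i + 1) 0 - X.getD i 0) -
    (X.getD (i + 2) 0 - X.getD (i + 1) 0) ^ 2

-- g(lo, hi): divide-and-conquer gcd (up to sign) of det(i) for lo ≤ i < hi
def pvG (X : List Int) (lo hi : Nat) : Int :=
  if hi - lo ≤ 1 then pvDet X lo
  else
    let mid := (lo + hi) / 2
    pyGcd (pvG X lo mid) (pvG X mid hi)
termination_by hi - lo
decreasing_by all_goals omega

def estimate_modulus_from_sequence_alt (X : List Int) : Option Int :=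
  if X.length < 4 then none
  else
    let M := |pvG X 0 (X.length - 3)|
    if M = 0 then none else some M

-- ===== PRECONDITION & SPEC =====
def Spec_estimate_modulus_from_sequence (X : List Int) (out : Option Int) : Prop := out = estimate_modulus_from_sequence_alt X
instance (X : List Int) (out : Option Int) : Decidable (Spec_estimate_modulus_from_sequence X out) := by unfold Spec_estimate_modulus_from_sequence; infer_instance

-- ===== CLAIM (what is proved, stated in full; the proofs are below) =====
def Claim_equal_estimate_modulus_from_sequence : Prop := ∀ (X : List Int), Dom_estimate_modulus_from_sequence X → Spec_estimate_modulus_from_sequence X (estimate_modulus_from_sequence X)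

-- ===== LEMMAS AND PROOFS =====

-- successive differences X[i+1]-X[i]
def pvDiffs : List Int → List Int
  | x :: y :: t => (y - x) :: pvDiffs (y :: t)
  | _ => []

-- window of three: d[i+2]*d[i] - d[i+1]^2
def pvW3 : List Int → List Int
  | a :: b :: c :: t => (c * a - b ^ 2) :: pvW3 (b :: c :: t)
  | _ => []

-- the window determinants as a list
def pvVals : List Int → List Int
  | a :: b :: c :: d :: t => ((d - c) * (b - a) - (c - b) ^ 2) :: pvVals (b :: c :: d :: t)
  | _ => []

theorem pvRangeMap_diffs (X : List Int) :
    (List.range (X.length - 1)).map (fun k => X.getD (k + 1) 0 - X.getD k 0) = pvDiffs X := by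
  induction X with
  | nil => simp [pvDiffs]
  | cons x t ih =>
    cases t with
    | nil => simp [pvDiffs]
    | cons y t' =>
      simp only [pvDiffs, List.length_cons]
      rw [show t'.length + 1 + 1 - 1 = t'.length + 1 from by omega, List.range_succ_eq_map,
        List.map_cons, List.map_map]
      refine congrArg₂ _ (by simp) ?_
      rw [← ih]
      simp only [List.length_cons]
      refine List.map_congr_left (fun k _ => ?_)
      simp [Function.comp]

theorem pvRangeMap_w3 (d : List Int) :
    (List.range (d.length - 2)).map
      (fun k => d.getD (k + 2) 0 * d.getD k 0 - (d.getD (k + 1) 0) ^ 2) = pvW3 d := by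
  induction d with
  | nil => simp [pvW3]
  | cons a t ih =>
    match t with
    | [] => simp [pvW3]
    | [b] => simp [pvW3]
    | b :: c :: t' =>
      simp only [pvW3, List.length_cons]
      rw [show t'.length + 1 + 1 + 1 - 2 = t'.length + 1 from by omega, List.range_succ_eq_map,
        List.map_cons, List.map_map]
      refine congrArg₂ _ (by simp) ?_
      rw [← ih]
      simp only [List.length_cons]
      refine List.map_congr_left (fun k _ => ?_)
      simp [Function.comp]

theorem pvW3_diffs (X : List Int) : pvW3 (pvDiffs X) = pvVals X := by
  induction X with
  | nil => rfl
  | cons a t ih =>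
    match t with
    | [] => rfl
    | [b] => rfl
    | [b, c] => rfl
    | b :: c :: d :: t' =>
      simp only [pvDiffs, pvW3, pvVals] at ih ⊢
      exact congrArg₂ _ rfl ih

-- A's append-if loop builds the filtered abs list
theorem pvFoldl_append_if (l : List Int) (f : Int → Int) (acc : List Int) :
    l.foldl (fun acc i => if f i ≠ 0 then acc ++ [|f i|] else acc) acc
      = acc ++ ((l.map f).filter (· ≠ 0)).map (fun v => |v|) := by
  induction l generalizing acc with
  | nil => simp
  | cons x t ih =>
    rw [List.foldl_cons, List.map_cons]
    by_cases h : f x = 0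
    · rw [if_neg (by simpa using h), List.filter_cons_of_neg (by simpa using h), ih]
    · rw [if_pos h, List.filter_cons_of_pos (by simpa using h), ih]
      simp

theorem pyGcd_nonneg (a b : Int) : 0 ≤ pyGcd a b := by
  simp [pyGcd]

theorem pyGcd_zero_right (a : Int) (h : 0 ≤ a) : pyGcd a 0 = a := by
  simp [pyGcd, Int.gcd]
  omega

theorem pyGcd_zero_left (b : Int) : pyGcd 0 b = |b| := by
  rw [Int.abs_eq_natAbs]
  simp [pyGcd, Int.gcd]

theorem pyGcd_abs_right (a b : Int) : pyGcd a |b| = pyGcd a b := by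
  simp [pyGcd, Int.gcd, Int.natAbs_abs]

theorem pyGcd_abs_left (a b : Int) : pyGcd |a| b = pyGcd a b := by
  simp [pyGcd, Int.gcd, Int.natAbs_abs]

theorem pyGcd_assoc (a b c : Int) : pyGcd (pyGcd a b) c = pyGcd a (pyGcd b c) := by
  simp [pyGcd, Int.gcd, Nat.gcd_assoc]

-- folding gcd from a nonneg seed ignores zeros and signs of the elements
theorem pvFoldl_gcd_filter (L : List Int) (g : Int) (hg : 0 ≤ g) :
    L.foldl pyGcd g = ((L.filter (· ≠ 0)).map (fun v => |v|)).foldl pyGcd g := by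
  induction L generalizing g with
  | nil => rfl
  | cons x t ih =>
    by_cases h : x = 0
    · subst h
      rw [List.filter_cons_of_neg (by simp), List.foldl_cons, pyGcd_zero_right g hg]
      exact ih g hg
    · rw [List.filter_cons_of_pos (by simpa using h), List.map_cons, List.foldl_cons,
        List.foldl_cons, pyGcd_abs_right]
      exact ih _ (pyGcd_nonneg _ _)

theorem pvFoldl_gcd_ne_zero (L : List Int) (g : Int) (hg : g ≠ 0) :
    L.foldl pyGcd g ≠ 0 := by
  induction L generalizing g with
  | nil => exact hg
  | cons x t ih =>
    refine ih _ ?_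
    simp only [pyGcd, ne_eq, Int.natCast_eq_zero, Int.gcd_eq_zero_iff, not_and]
    intro h; exact absurd h hg

theorem pvFoldl_gcd_nonneg (L : List Int) (g : Int) (hg : 0 ≤ g) :
    0 ≤ L.foldl pyGcd g := by
  induction L generalizing g with
  | nil => exact hg
  | cons x t ih => exact ih _ (pyGcd_nonneg _ _)

-- fold from a nonneg seed = gcd of the seed with the fold from 0
theorem pvFoldl_gcd_out (L : List Int) (g : Int) (hg : 0 ≤ g) :
    L.foldl pyGcd g = pyGcd g (L.foldl pyGcd 0) := by
  induction L generalizing g with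
  | nil => exact (pyGcd_zero_right g hg).symm
  | cons x t ih =>
    rw [List.foldl_cons, List.foldl_cons, ih _ (pyGcd_nonneg _ _), ih _ (pyGcd_nonneg _ _),
      pyGcd_assoc, pyGcd_zero_left, pyGcd_abs_left]

theorem pvFoldl_gcd_append (L1 L2 : List Int) :
    (L1 ++ L2).foldl pyGcd 0 = pyGcd (L1.foldl pyGcd 0) (L2.foldl pyGcd 0) := by
  rw [List.foldl_append, pvFoldl_gcd_out L2 _ (pvFoldl_gcd_nonneg _ _ le_rfl)]

-- |pvG X lo hi| is the gcd fold of the determinants on [lo, hi)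
theorem pvG_eq_fold (X : List Int) (lo hi : Nat) (h : lo < hi) :
    |pvG X lo hi| = ((List.range' lo (hi - lo)).map (pvDet X)).foldl pyGcd 0 := by
  by_cases h1 : hi - lo ≤ 1
  · have : hi - lo = 1 := by omega
    rw [pvG, if_pos h1, this]
    simp [List.range', pyGcd_zero_left]
  · rw [pvG, if_neg h1]
    have hm1 : lo < (lo + hi) / 2 := by omega
    have hm2 : (lo + hi) / 2 < hi := by omega
    have hsplit : List.range' lo (hi - lo) =
        List.range' lo ((lo + hi) / 2 - lo) ++ List.range' ((lo + hi) / 2) (hi - (lo + hi) / 2) := by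
      have h := @List.range'_append lo ((lo + hi) / 2 - lo) (hi - (lo + hi) / 2) 1
      rw [show lo + 1 * ((lo + hi) / 2 - lo) = (lo + hi) / 2 from by omega,
        show (lo + hi) / 2 - lo + (hi - (lo + hi) / 2) = hi - lo from by omega] at h
      exact h.symm
    rw [hsplit, List.map_append, pvFoldl_gcd_append,
      ← pvG_eq_fold X lo ((lo + hi) / 2) hm1, ← pvG_eq_fold X ((lo + hi) / 2) hi hm2]
    have := pyGcd_nonneg (pvG X lo ((lo + hi) / 2)) (pvG X ((lo + hi) / 2) hi)
    rw [abs_of_nonneg this, pyGcd_abs_left, pyGcd_abs_right]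
termination_by hi - lo
decreasing_by all_goals omega

-- pvVals X is exactly the list of determinants
theorem pvVals_eq_range (X : List Int) :
    pvVals X = (List.range (X.length - 3)).map (pvDet X) := by
  induction X with
  | nil => rfl
  | cons x t ih =>
    match t with
    | [] => rfl
    | [b] => rfl
    | [b, c] => rfl
    | b :: c :: d :: t' =>
      simp only [pvVals, List.length_cons] at ih ⊢
      rw [show t'.length + 1 + 1 + 1 + 1 - 3 = t'.length + 1 from by omega,
        List.range_succ_eq_map, List.map_cons, List.map_map]
      refine congrArg₂ _ (by simp [pvDet]) ?_
      rw [ih, show t'.length + 1 + 1 + 1 - 3 = t'.length from by omega]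
      refine List.map_congr_left (fun k _ => ?_)
      simp [Function.comp, pvDet]

-- the generic core: A's tail (filter/abs list, seeded gcd fold, abs) = fold gcd from 0
theorem pvCore (L : List Int) :
    (match ((L.filter (· ≠ 0)).map (fun v => |v|)) with
      | [] => (none : Option Int)
      | y :: ys =>
        let M := ys.foldl pyGcd y
        if M ≠ 0 then some |M| else none)
    = (if L.foldl pyGcd 0 = 0 then none else some (L.foldl pyGcd 0)) := by
  rw [pvFoldl_gcd_filter L 0 le_rfl]
  cases hY : ((L.filter (· ≠ 0)).map (fun v => |v|)) with
  | nil => simp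
  | cons y ys =>
    have hy : 0 < y := by
      have hmem : y ∈ (L.filter (· ≠ 0)).map (fun v => |v|) := by rw [hY]; exact List.mem_cons_self
      obtain ⟨v, hv, rfl⟩ := List.mem_map.mp hmem
      have : v ≠ 0 := by simpa using List.of_mem_filter hv
      exact abs_pos.mpr this
    have hfold : (y :: ys).foldl pyGcd 0 = ys.foldl pyGcd y := by
      simp only [List.foldl_cons]
      refine congrArg₂ _ ?_ rfl
      rw [← abs_of_pos hy, pyGcd_abs_right]
      simp [pyGcd]
    have hne : ys.foldl pyGcd y ≠ 0 := pvFoldl_gcd_ne_zero ys y (by omega)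
    have hnn : 0 ≤ ys.foldl pyGcd y := pvFoldl_gcd_nonneg ys y (le_of_lt hy)
    simp only [hfold, ne_eq]
    simp [hne, abs_of_nonneg hnn]

-- ===== VERDICT (by name: the statement is the Claim_ definition above) =====
theorem estimate_modulus_from_sequence_spec : Claim_equal_estimate_modulus_from_sequence := by
  intro X _
  unfold Spec_estimate_modulus_from_sequence estimate_modulus_from_sequence
    estimate_modulus_from_sequence_alt
  by_cases h4 : X.length < 4
  · simp [h4]
  · rw [if_neg h4, if_neg h4]
    -- the diffs list A builds is pvDiffs X
    have hd : (PySem.List.pyRange 0 ((X.length : Int) - 1) 1).map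
        (fun i => PySem.List.pyGetD X (i + 1) 0 - PySem.List.pyGetD X i 0) = pvDiffs X := by
      rw [PySem.List.pyRange_one, List.map_map, ← pvRangeMap_diffs X,
        show (((X.length : Int) - 1) - 0).toNat = X.length - 1 from by omega]
      refine List.map_congr_left (fun k _ => ?_)
      have h0 : ((0 : Int) + ↑k) = ((k : Nat) : Int) := by ring
      have h1 : ((k : Nat) : Int) + 1 = ((k + 1 : Nat) : Int) := by norm_cast
      simp only [Function.comp, h0, h1, PySem.List.pyGetD_natCast]
    -- A's Ys loop builds the filtered abs list of pvVals X
    have hv : (PySem.List.pyRange 0 (((pvDiffs X).length : Int) - 2) 1).map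
        (fun i => PySem.List.pyGetD (pvDiffs X) (i + 2) 0 * PySem.List.pyGetD (pvDiffs X) i 0 -
          (PySem.List.pyGetD (pvDiffs X) (i + 1) 0) ^ 2) = pvVals X := by
      rw [PySem.List.pyRange_one, List.map_map, ← pvW3_diffs X, ← pvRangeMap_w3 (pvDiffs X),
        show ((((pvDiffs X).length : Int) - 2) - 0).toNat = (pvDiffs X).length - 2 from by omega]
      refine List.map_congr_left (fun k _ => ?_)
      have h0 : ((0 : Int) + ↑k) = ((k : Nat) : Int) := by ring
      have h1 : ((k : Nat) : Int) + 1 = ((k + 1 : Nat) : Int) := by norm_cast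
      have h2 : ((k : Nat) : Int) + 2 = ((k + 2 : Nat) : Int) := by norm_cast
      simp only [Function.comp, h0, h1, h2, PySem.List.pyGetD_natCast]
    have hG : |pvG X 0 (X.length - 3)| = (pvVals X).foldl pyGcd 0 := by
      rw [pvG_eq_fold X 0 (X.length - 3) (by omega), pvVals_eq_range, List.range_eq_range']
      simp
    simp only [hd, hv, pvFoldl_append_if _ _ [], List.nil_append]
    have := pvCore (pvVals X)
    rw [← hG] at this
    -- align the shapes
    simpa using this
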